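-- pv_equiv track=rewrite | github.com/DanielVelinrb/30DaysCode | Day12/Day12.py | misma_cantidad_caracteres
-- ===== SOURCE A (Python) =====
-- def misma_cantidad_caracteres(str1, str2):
--     caracteres_str1 = list(str1)
--     caracteres_str2 = list(str2)
--
--     if len(caracteres_str1) != len(caracteres_str2):
--         return False
--
--     for char in caracteres_str1:
--         if char not in caracteres_str2:
--             return False
--
--     for char in caracteres_str2:
--         if char not in caracteres_str1:
--             return False
--
--     for i in range(len(caracteres_str1)):
--         if caracteres_str1[i] == caracteres_str2[i]:
--             return False
--
--     return True
-- ===== SOURCE B (Python) =====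
-- def misma_cantidad_caracteres(str1, str2):
--     if len(str1) != len(str2):
--         return False
--     m1 = 0
--     m2 = 0
--     for a, b in zip(str1, str2):
--         if a == b:
--             return False
--         m1 |= 1 << ord(a)
--         m2 |= 1 << ord(b)
--     return m1 == m2
-- ===== Notes on version B (the rewrite author's own statement) =====
-- stated objective: faster
-- what changed: Replaces the two symmetric membership scans and the separate index loop with one fused zip pass that early-exits on a positional match while building two direct-address bitmasks (one bit per character code), compared once at the end.
import Mathlib
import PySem

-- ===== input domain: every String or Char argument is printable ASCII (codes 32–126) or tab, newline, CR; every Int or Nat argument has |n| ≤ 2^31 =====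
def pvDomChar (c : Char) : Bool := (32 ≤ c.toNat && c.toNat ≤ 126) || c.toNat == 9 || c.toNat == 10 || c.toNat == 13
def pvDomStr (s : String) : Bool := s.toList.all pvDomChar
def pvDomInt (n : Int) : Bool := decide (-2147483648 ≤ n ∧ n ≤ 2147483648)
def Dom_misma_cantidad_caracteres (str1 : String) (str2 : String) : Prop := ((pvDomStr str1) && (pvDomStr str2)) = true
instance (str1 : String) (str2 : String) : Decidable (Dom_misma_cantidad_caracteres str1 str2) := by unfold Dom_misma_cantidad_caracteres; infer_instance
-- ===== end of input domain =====

-- B fuses A's three loops into one pass building two per-character-code bitmasks,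
-- early-exiting on a positional match and comparing the masks once at the end.

-- ===== PORT A =====
def misma_cantidad_caracteres (str1 : String) (str2 : String) : Bool :=
  let c1 := str1.toList
  let c2 := str2.toList
  if c1.length ≠ c2.length then false
  else if c1.any (fun ch => !(c2.contains ch)) then false
  else if c2.any (fun ch => !(c1.contains ch)) then false
  else if (List.range c1.length).any (fun i => c1.getD i ' ' == c2.getD i ' ') then false
  else true

-- ===== PORT B =====
-- the fused loop of Source B: early return on a positional match, otherwise OR each
-- character's bit into its string's mask; at the end compare the two masks.
def pvLoopB : List (Char × Char) → Nat → Nat → Bool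
  | [], m1, m2 => m1 == m2
  | (a, b) :: rest, m1, m2 =>
      if a == b then false
      else pvLoopB rest (m1 ||| (1 <<< a.toNat)) (m2 ||| (1 <<< b.toNat))

def misma_cantidad_caracteres_alt (str1 : String) (str2 : String) : Bool :=
  if str1.toList.length ≠ str2.toList.length then false
  else pvLoopB (str1.toList.zip str2.toList) 0 0

-- ===== PRECONDITION & SPEC =====
def Spec_misma_cantidad_caracteres (str1 : String) (str2 : String) (out : Bool) : Prop := out = misma_cantidad_caracteres_alt str1 str2
instance (str1 : String) (str2 : String) (out : Bool) : Decidable (Spec_misma_cantidad_caracteres str1 str2 out) := by unfold Spec_misma_cantidad_caracteres; infer_instance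

-- ===== CLAIM (what is proved, stated in full; the proofs are below) =====
def Claim_equal_misma_cantidad_caracteres : Prop := ∀ (str1 : String) (str2 : String), Dom_misma_cantidad_caracteres str1 str2 → Spec_misma_cantidad_caracteres str1 str2 (misma_cantidad_caracteres str1 str2)

-- ===== LEMMAS AND PROOFS =====

-- mask accumulator, used only to characterise pvLoopB in the proofs
def pvMask : List Char → Nat → Nat
  | [], m => m
  | c :: l, m => pvMask l (m ||| (1 <<< c.toNat))

theorem pvMask_testBit (l : List Char) (m : Nat) (k : Nat) :
    (pvMask l m).testBit k = (decide (k ∈ l.map Char.toNat) || m.testBit k) := by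
  induction l generalizing m with
  | nil => simp [pvMask]
  | cons c l ih =>
    simp only [pvMask, ih, List.map_cons, List.mem_cons]
    rw [Nat.testBit_or, Nat.shiftLeft_eq, one_mul]
    have h1 : (2 ^ c.toNat).testBit k = decide (k = c.toNat) := by
      by_cases h : k = c.toNat
      · simp [h, Nat.testBit_two_pow_self]
      · simp [h, Nat.testBit_two_pow_of_ne (fun he => h he.symm)]
    rw [h1]
    by_cases h : k = c.toNat <;> cases hm : m.testBit k <;>
      by_cases h2 : k ∈ l.map Char.toNat <;> simp [h, h2]

theorem pvChar_toNat_inj {c d : Char} (h : c.toNat = d.toNat) : c = d := by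
  apply Char.ext
  apply UInt32.toNat_inj.mp
  exact h

theorem pvMask_eq_iff (l1 l2 : List Char) :
    (pvMask l1 0 == pvMask l2 0) = true ↔ (∀ c : Char, c ∈ l1 ↔ c ∈ l2) := by
  rw [beq_iff_eq]
  constructor
  · intro h c
    have hb := congrArg (fun n => Nat.testBit n c.toNat) h
    simp only [pvMask_testBit, Nat.zero_testBit, Bool.or_false, decide_eq_decide,
      List.mem_map] at hb
    constructor
    · intro hc
      obtain ⟨d, hd, hdc⟩ := hb.mp ⟨c, hc, rfl⟩
      rwa [← pvChar_toNat_inj hdc]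
    · intro hc
      obtain ⟨d, hd, hdc⟩ := hb.mpr ⟨c, hc, rfl⟩
      rwa [← pvChar_toNat_inj hdc]
  · intro h
    apply Nat.eq_of_testBit_eq
    intro k
    simp only [pvMask_testBit, Nat.zero_testBit, Bool.or_false, decide_eq_decide,
      List.mem_map]
    constructor
    · rintro ⟨c, hc, rfl⟩; exact ⟨c, (h c).mp hc, rfl⟩
    · rintro ⟨c, hc, rfl⟩; exact ⟨c, (h c).mpr hc, rfl⟩

-- pvLoopB = "no positional match" test plus mask accumulation over each side
theorem pvLoopB_eq (l : List (Char × Char)) (m1 m2 : Nat) :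
    pvLoopB l m1 m2 =
      (!(l.any (fun p => p.1 == p.2)) && (pvMask (l.map Prod.fst) m1 == pvMask (l.map Prod.snd) m2)) := by
  induction l generalizing m1 m2 with
  | nil => simp [pvLoopB, pvMask]
  | cons p l ih =>
    obtain ⟨a, b⟩ := p
    cases h : a == b
    · simp [pvLoopB, h, ih, pvMask]
    · simp [pvLoopB, h]

-- Index loop over the range equals the zip-based scan, when lengths agree.
theorem pv_range_any_eq_zip_any (l1 l2 : List Char) (h : l1.length = l2.length) :
    ((List.range l1.length).any (fun i => l1.getD i ' ' == l2.getD i ' '))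
      = ((l1.zip l2).any (fun p => p.1 == p.2)) := by
  induction l1 generalizing l2 with
  | nil => simp
  | cons a l1 ih =>
    cases l2 with
    | nil => simp at h
    | cons b l2 =>
      simp only [List.length_cons, List.range_succ_eq_map, List.any_cons, List.any_map,
        List.zip_cons_cons]
      simp only [List.getD_cons_zero, Function.comp_def, List.getD_cons_succ]
      rw [ih l2 (by simpa using h)]

-- The two membership scans together say exactly "same character set".
theorem pv_scans_iff (l1 l2 : List Char) :
    ((l1.any (fun ch => !(l2.contains ch)) = false) ∧ (l2.any (fun ch => !(l1.contains ch)) = false))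
      ↔ (∀ c : Char, c ∈ l1 ↔ c ∈ l2) := by
  simp only [List.any_eq_false]
  constructor
  · rintro ⟨h1, h2⟩ c
    constructor
    · intro hc; have := h1 c hc; simpa using this
    · intro hc; have := h2 c hc; simpa using this
  · intro h
    constructor
    · intro c hc; simpa using (h c).mp hc
    · intro c hc; simpa using (h c).mpr hc

-- ===== VERDICT (by name: the statement is the Claim_ definition above) =====
theorem misma_cantidad_caracteres_spec : Claim_equal_misma_cantidad_caracteres := by
  intro str1 str2 _
  unfold Spec_misma_cantidad_caracteres misma_cantidad_caracteres misma_cantidad_caracteres_alt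
  by_cases hlen : str1.toList.length = str2.toList.length
  · rw [if_neg (not_ne_iff.mpr hlen), if_neg (not_ne_iff.mpr hlen)]
    set l1 := str1.toList
    set l2 := str2.toList
    rw [pvLoopB_eq, List.map_fst_zip (Nat.le_of_eq hlen),
      List.map_snd_zip (Nat.le_of_eq hlen.symm)]
    by_cases hset : ∀ c : Char, c ∈ l1 ↔ c ∈ l2
    · have hscans := (pv_scans_iff l1 l2).mpr hset
      rw [if_neg (by rw [hscans.1]; exact Bool.false_ne_true),
        if_neg (by rw [hscans.2]; exact Bool.false_ne_true)]
      have hmask := (pvMask_eq_iff l1 l2).mpr hset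
      rw [hmask, Bool.and_true, pv_range_any_eq_zip_any _ _ hlen]
      cases hz : ((l1.zip l2).any fun p => p.1 == p.2) with
      | true => rw [if_pos rfl]; rfl
      | false => rw [if_neg Bool.false_ne_true]; rfl
    · have hmask : (pvMask l1 0 == pvMask l2 0) = false := by
        cases hq : (pvMask l1 0 == pvMask l2 0) with
        | true => exact absurd ((pvMask_eq_iff l1 l2).mp hq) hset
        | false => rfl
      rw [hmask, Bool.and_false]
      cases h1 : (l1.any fun ch => !(l2.contains ch)) with
      | true => rw [if_pos rfl]
      | false =>
        rw [if_neg Bool.false_ne_true]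
        cases h2 : (l2.any fun ch => !(l1.contains ch)) with
        | true => rw [if_pos rfl]
        | false => exact absurd ((pv_scans_iff l1 l2).mp ⟨h1, h2⟩) hset
  · rw [if_pos hlen, if_pos hlen]
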